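-- pv_equiv track=rewrite | github.com/temawm/interpretedProgrammingLanguages | InterpretedProgramming/fourthTaskPython.py | find_most_frequent_indices
-- ===== SOURCE A (Python) =====
-- def find_most_frequent_indices(nums):
--     num_list = nums.split()
--     num_counts = {}
--
--     for i, num in enumerate(num_list):
--         if num in num_counts:
--             num_counts[num].append(i)
--         else:
--             num_counts[num] = [i]
--
--     most_frequent_num = max(num_counts, key=lambda x: len(num_counts[x]))
--
--     return num_counts[most_frequent_num]
-- ===== SOURCE B (Python) =====
-- def find_most_frequent_indices(nums):
--     num_list = nums.split()
--     counts = {}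
--     for num in num_list:
--         counts[num] = counts.get(num, 0) + 1
--     winner = max(counts, key=counts.get)
--     return [i for i, num in enumerate(num_list) if num == winner]
-- ===== Notes on version B (the rewrite author's own statement) =====
-- stated objective: idiomatic
-- what changed: B keeps only a token->count dict (Counter-style) instead of A's per-token index lists, picks the winner by count with first-insertion tie-break, and recovers the winner's indices in a separate enumerate pass.
import Mathlib
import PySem

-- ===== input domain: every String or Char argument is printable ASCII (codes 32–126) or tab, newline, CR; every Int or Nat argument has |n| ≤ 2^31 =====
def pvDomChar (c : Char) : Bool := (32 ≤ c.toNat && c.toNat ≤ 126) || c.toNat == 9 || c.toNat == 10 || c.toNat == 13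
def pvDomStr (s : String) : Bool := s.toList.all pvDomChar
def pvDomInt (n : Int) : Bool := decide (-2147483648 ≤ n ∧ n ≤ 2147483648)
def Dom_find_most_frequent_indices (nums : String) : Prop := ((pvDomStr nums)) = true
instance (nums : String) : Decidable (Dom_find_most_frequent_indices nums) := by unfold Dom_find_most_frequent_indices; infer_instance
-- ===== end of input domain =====

-- B builds a plain token→count table and recovers the winner's indices in a second
-- enumerate pass, instead of A's per-token index lists; objective: idiomatic.


-- ===== PORT A =====
def find_most_frequent_indices (nums : String) : List Int :=
  let num_list := PySem.Str.split₀ nums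
  let num_counts : PySem.Dict String (List Int) :=
    (PySem.List.enumerate num_list).foldl
      (fun d p => if d.contains p.2 then d.modify p.2 [] (fun v => v ++ [p.1])
                  else d.insert p.2 [p.1])
      PySem.Dict.empty
  -- max(num_counts, key=lambda x: len(num_counts[x])); none = ValueError (excluded by Pre_)
  match PySem.List.max? num_counts.keys (fun k => (num_counts.getD k []).length) with
  | some most_frequent_num => num_counts.getD most_frequent_num []
  | none => []

-- ===== PORT B =====
def find_most_frequent_indices_alt (nums : String) : List Int :=
  let num_list := PySem.Str.split₀ nums
  let counts : PySem.Dict String Int :=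
    num_list.foldl (fun d x => d.insert x (d.getD x 0 + 1)) PySem.Dict.empty
  -- max(counts, key=counts.get); none = ValueError (excluded by Pre_)
  match PySem.List.max? counts.keys (fun k => counts.getD k 0) with
  | some winner => ((PySem.List.enumerate num_list).filter (fun p => p.2 == winner)).map (fun p => p.1)
  | none => []

-- ===== PRECONDITION & SPEC =====
-- Pre_ excludes only whitespace-only/empty strings: there nums.split() is empty and
-- A raises ValueError (max() of an empty dict); B raises the same way.
def Pre_find_most_frequent_indices (nums : String) : Prop := PySem.Str.split₀ nums ≠ []
instance (nums : String) : Decidable (Pre_find_most_frequent_indices nums) := by unfold Pre_find_most_frequent_indices; infer_instance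
def pvWitness_find_most_frequent_indices : String := "7 a 7"

def Spec_find_most_frequent_indices (nums : String) (out : List Int) : Prop := out = find_most_frequent_indices_alt nums
instance (nums : String) (out : List Int) : Decidable (Spec_find_most_frequent_indices nums out) := by unfold Spec_find_most_frequent_indices; infer_instance

-- ===== CLAIM (what is proved, stated in full; the proofs are below) =====
def Claim_equal_find_most_frequent_indices : Prop := ∀ (nums : String), Dom_find_most_frequent_indices nums → Pre_find_most_frequent_indices nums → Spec_find_most_frequent_indices nums (find_most_frequent_indices nums)

-- ===== LEMMAS AND PROOFS =====

-- A's branchy loop step is exactly one Dict.modify (insert on a fresh key appends the one-element list).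
theorem stepA_eq_modify (d : PySem.Dict String (List Int)) (p : Int × String) :
    (if d.contains p.2 then d.modify p.2 [] (fun v => v ++ [p.1]) else d.insert p.2 [p.1])
      = d.modify p.2 [] (fun v => v ++ [p.1]) := by
  by_cases h : d.contains p.2 = true
  · simp [h]
  · have hc : d.contains p.2 = false := by simp [h]
    simp [hc, PySem.Dict.modify, PySem.Dict.getD_of_not_contains d [] hc]

-- A's whole loop is the uniform grouping loop.
theorem foldA_eq_modify (l : List String) :
    (PySem.List.enumerate l).foldl
      (fun d p => if d.contains p.2 then d.modify p.2 [] (fun v => v ++ [p.1])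
                  else d.insert p.2 [p.1]) PySem.Dict.empty
      = (PySem.List.enumerate l).foldl
          (fun d p => d.modify p.2 [] (fun v => v ++ [p.1])) PySem.Dict.empty :=
  PySem.List.foldl_congr_mem _ _ _ _ (fun acc x _ => stepA_eq_modify acc x)

-- A's grouping dict looks up to the winner's index list = the filtered enumerate pass of B.
theorem groupA_getD (l : List String) (c : String) :
    (((PySem.List.enumerate l).foldl
        (fun d p => if d.contains p.2 then d.modify p.2 [] (fun v => v ++ [p.1])
                    else d.insert p.2 [p.1]) PySem.Dict.empty).getD c [])
      = ((PySem.List.enumerate l).filter (fun p => p.2 == c)).map (fun p => p.1) := by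
  rw [foldA_eq_modify]
  have hswap : (PySem.List.enumerate l).foldl
      (fun d p => d.modify p.2 [] (fun v => v ++ [p.1])) PySem.Dict.empty
      = ((PySem.List.enumerate l).map Prod.swap).foldl
          (fun d p => d.modify p.1 [] (fun v => v ++ [p.2])) PySem.Dict.empty := by
    rw [List.foldl_map]; simp [Prod.swap]
  rw [hswap, PySem.Dict.getD_foldl_modify_append]
  simp [List.filter_map, Function.comp_def, List.map_map]

-- length of the index list for any token = its count
theorem groupA_len (l : List String) (c : String) :
    (((PySem.List.enumerate l).filter (fun p => p.2 == c)).map (fun p => p.1)).length = l.count c := by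
  rw [List.length_map, ← List.countP_eq_length_filter]
  have h := List.countP_map (p := fun s => s == c) (f := fun p : Int × String => p.2) (l := PySem.List.enumerate l)
  rw [PySem.List.map_snd_enumerate] at h
  simpa [Function.comp_def, List.count] using h.symm

-- B's counting dict looks up to the count
theorem countB_getD (l : List String) (c : String) :
    ((l.foldl (fun d x => d.insert x (d.getD x 0 + 1)) (PySem.Dict.empty : PySem.Dict String Int)).getD c 0) = (l.count c : Int) := by
  rw [PySem.Dict.getD_foldl_insert_add_one]
  simp

-- max? is determined only by the order of the keys; a Nat key and its Int cast order keys identically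
theorem max?_cast (xs : List String) (f : String → Nat) :
    PySem.List.max? xs (fun k => ((f k : Nat) : Int)) = PySem.List.max? xs f := by
  unfold PySem.List.max?
  refine PySem.List.foldl_congr_mem _ _ _ _ ?_
  intro acc x _
  cases acc with
  | none => rfl
  | some m => simp [Nat.cast_lt]

-- ===== VERDICT (by name: the statement is the Claim_ definition above) =====
theorem find_most_frequent_indices_spec : Claim_equal_find_most_frequent_indices := by
  intro nums _ _
  unfold Spec_find_most_frequent_indices find_most_frequent_indices find_most_frequent_indices_alt
  simp only
  set l := PySem.Str.split₀ nums with hl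
  have hkeysA : ((PySem.List.enumerate l).foldl
      (fun d p => if d.contains p.2 then d.modify p.2 [] (fun v => v ++ [p.1])
                  else d.insert p.2 [p.1]) PySem.Dict.empty).keys = PySem.Set.ofList l := by
    rw [foldA_eq_modify,
        PySem.Dict.keys_foldl_modify_key (PySem.List.enumerate l) (fun p => p.2) []
          (fun d p v => v ++ [p.1]) PySem.Dict.empty]
    simp [PySem.List.map_snd_enumerate, PySem.Dict.keys_empty, PySem.Set.update, PySem.Set.ofList]
  have hkeysB : ((l.foldl (fun d x => d.insert x (d.getD x 0 + 1)) (PySem.Dict.empty : PySem.Dict String Int))).keys = PySem.Set.ofList l := by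
    rw [PySem.Dict.keys_foldl_insert]
    simp [PySem.Dict.keys_empty, PySem.Set.update, PySem.Set.ofList]
  have hmaxA : PySem.List.max? ((PySem.List.enumerate l).foldl
      (fun d p => if d.contains p.2 then d.modify p.2 [] (fun v => v ++ [p.1])
                  else d.insert p.2 [p.1]) PySem.Dict.empty).keys
      (fun k => (((PySem.List.enumerate l).foldl
        (fun d p => if d.contains p.2 then d.modify p.2 [] (fun v => v ++ [p.1])
                    else d.insert p.2 [p.1]) PySem.Dict.empty).getD k []).length)
      = PySem.List.max? (PySem.Set.ofList l) (fun k => l.count k) := by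
    rw [hkeysA]
    exact congrArg _ (funext fun k => by rw [groupA_getD, groupA_len])
  have hmaxB : PySem.List.max? ((l.foldl (fun d x => d.insert x (d.getD x 0 + 1)) (PySem.Dict.empty : PySem.Dict String Int))).keys
      (fun k => (l.foldl (fun d x => d.insert x (d.getD x 0 + 1)) (PySem.Dict.empty : PySem.Dict String Int)).getD k 0)
      = PySem.List.max? (PySem.Set.ofList l) (fun k => ((l.count k : Nat) : Int)) := by
    rw [hkeysB]
    exact congrArg _ (funext fun k => countB_getD l k)
  rw [hmaxA, hmaxB, max?_cast (PySem.Set.ofList l) (fun k => l.count k)]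
  cases h : PySem.List.max? (PySem.Set.ofList l) (fun k => l.count k) with
  | none => rfl
  | some w => simpa using groupA_getD l w
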